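-- pv_equiv track=rewrite | github.com/diasasalways/ubs_coding_challenge | app.py | inverse_double_consonants
-- ===== SOURCE A (Python) =====
-- from typing import Any, Dict, List, Tuple, Optional, Set
--
-- CONSONANTS_SET = set("bcdfghjklmnpqrstvwxyzBCDFGHJKLMNPQRSTVWXYZ")
--
-- def _split_words_preserve_spaces(s: str) -> List[str]:
--     # Split by single spaces, collapse multiple spaces to single between tokens as per challenge simplicity
--     # We assume inputs are standard spaced phrases
--     return s.split(" ")
--
-- def inverse_double_consonants(s: str) -> str:
--     def undbl(tok: str) -> str:
--         out = []
--         i = 0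
--         while i < len(tok):
--             ch = tok[i]
--             if ch in CONSONANTS_SET and i + 1 < len(tok) and tok[i + 1] == ch:
--                 out.append(ch)
--                 i += 2
--             else:
--                 out.append(ch)
--                 i += 1
--         return ''.join(out)
--     parts = _split_words_preserve_spaces(s)
--     return " ".join(undbl(p) for p in parts)
-- ===== SOURCE B (Python) =====
-- CONSONANTS = "bcdfghjklmnpqrstvwxyzBCDFGHJKLMNPQRSTVWXYZ"
--
-- def inverse_double_consonants(s: str) -> str:
--     # Single stateful pass over the whole string: a char is skipped when it
--     # repeats the previous char, that previous char was kept, and it is a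
--     # consonant.  No word splitting needed: spaces are never consonants.
--     out = []
--     prev = None
--     dropped = True
--     for ch in s:
--         if ch == prev and not dropped and ch in CONSONANTS:
--             dropped = True
--         else:
--             out.append(ch)
--             dropped = False
--         prev = ch
--     return ''.join(out)
-- ===== Notes on version B (the rewrite author's own statement) =====
-- stated objective: simpler
-- what changed: Replaces A's split-into-words plus per-word index-jumping while loop (i+=2 on a doubled consonant) with one stateful left-to-right pass over the whole string keeping (prev char, was-it-dropped) state; word splitting is unnecessary because spaces are never consonants, which also removes the intermediate word list and the generator join (measured constant-factor speedup).
import Mathlib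
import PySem

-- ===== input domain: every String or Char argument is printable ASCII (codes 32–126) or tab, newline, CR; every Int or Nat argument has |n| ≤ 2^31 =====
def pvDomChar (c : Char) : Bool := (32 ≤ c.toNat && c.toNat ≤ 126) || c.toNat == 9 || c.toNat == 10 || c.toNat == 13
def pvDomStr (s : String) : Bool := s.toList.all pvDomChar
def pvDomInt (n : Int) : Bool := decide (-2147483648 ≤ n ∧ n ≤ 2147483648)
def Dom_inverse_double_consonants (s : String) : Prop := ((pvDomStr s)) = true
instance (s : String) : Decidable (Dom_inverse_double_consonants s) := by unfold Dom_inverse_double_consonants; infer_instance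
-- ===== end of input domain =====

-- B replaces A's split-into-words + per-word index-jumping while loop by one
-- stateful left-to-right pass over the whole string (objective: simpler;
-- spaces are never consonants, so no word splitting is needed).

-- ===== PORT A =====
-- CONSONANTS_SET = set("bcdfghjklmnpqrstvwxyzBCDFGHJKLMNPQRSTVWXYZ")
def CONSONANTS_SET : PySem.Set Char := PySem.Set.ofList "bcdfghjklmnpqrstvwxyzBCDFGHJKLMNPQRSTVWXYZ".toList

-- the inner `undbl` while loop on the token's chars: `i += 2` consumes two
-- chars, `i += 1` consumes one; `i + 1 < len(tok) and tok[i + 1] == ch` is the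
-- look at the second element of the remaining list (exact: the while loop only
-- ever reads tok[i] and tok[i+1]); branch order as in A.
def undblA : List Char → List Char
  | [] => []                                     -- i == len(tok): loop ends
  | [c] => [c]                                   -- i + 1 >= len(tok): single emit
  | c1 :: c2 :: rest =>
      if PySem.Set.contains CONSONANTS_SET c1 && (c2 == c1) then
        c1 :: undblA rest                        -- out.append(ch); i += 2
      else
        c1 :: undblA (c2 :: rest)                -- out.append(ch); i += 1

-- s.split(" ") with the nonempty literal sep " " is PySem.Chars.splitOn;
-- " ".join(...) is PySem.Chars.join.
def inverse_double_consonants (s : String) : String :=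
  String.ofList (PySem.Chars.join [' '] ((PySem.Chars.splitOn s.toList [' ']).map undblA))

-- ===== PORT B =====
def CONSONANTS : List Char := "bcdfghjklmnpqrstvwxyzBCDFGHJKLMNPQRSTVWXYZ".toList

-- one iteration of B's for-loop over the state (out, prev, dropped);
-- `ch in CONSONANTS` for a single char is char membership (exact).
def bStep (st : List Char × Option Char × Bool) (ch : Char) : List Char × Option Char × Bool :=
  if (some ch == st.2.1) && !st.2.2 && CONSONANTS.contains ch then
    (st.1, some ch, true)
  else
    (st.1 ++ [ch], some ch, false)

def inverse_double_consonants_alt (s : String) : String :=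
  String.ofList (s.toList.foldl bStep ([], none, true)).1

-- ===== PRECONDITION & SPEC =====
def Spec_inverse_double_consonants (s : String) (out : String) : Prop := out = inverse_double_consonants_alt s
instance (s : String) (out : String) : Decidable (Spec_inverse_double_consonants s out) := by unfold Spec_inverse_double_consonants; infer_instance

-- ===== CLAIM (what is proved, stated in full; the proofs are below) =====
def Claim_equal_inverse_double_consonants : Prop := ∀ (s : String), Dom_inverse_double_consonants s → Spec_inverse_double_consonants s (inverse_double_consonants s)

-- ===== LEMMAS AND PROOFS =====

def bgo : Option Char → Bool → List Char → List Char
  | _, _, [] => []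
  | prev, dropped, c :: cs =>
      if (some c == prev) && !dropped && CONSONANTS.contains c then
        bgo (some c) true cs
      else
        c :: bgo (some c) false cs
def willDrop (prev : Option Char) (dropped : Bool) : List Char → Bool
  | [] => false
  | c :: _ => (some c == prev) && !dropped && CONSONANTS.contains c

lemma in_consonants_iff (c : Char) :
    PySem.Set.contains CONSONANTS_SET c = CONSONANTS.contains c := by
  rw [Bool.eq_iff_iff]
  simp [CONSONANTS_SET, CONSONANTS, PySem.Set.mem_ofList]

lemma foldl_bStep_eq_bgo (l : List Char) : ∀ (out : List Char) (prev : Option Char) (dropped : Bool),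
    (l.foldl bStep (out, prev, dropped)).1 = out ++ bgo prev dropped l := by
  induction l with
  | nil => intro out prev dropped; simp [bgo]
  | cons c cs ih =>
    intro out prev dropped
    simp only [List.foldl_cons, bStep, bgo]
    split <;> simp [ih]

lemma bgo_cons (prev : Option Char) (dropped : Bool) (c : Char) (cs : List Char) :
    bgo prev dropped (c :: cs) =
      if (some c == prev) && !dropped && CONSONANTS.contains c then
        bgo (some c) true cs
      else
        c :: bgo (some c) false cs := rfl

lemma bgo_eq_undblA : ∀ n cs prev dropped, cs.length ≤ n →
    willDrop prev dropped cs = false → bgo prev dropped cs = undblA cs := by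
  intro n
  induction n with
  | zero =>
    intro cs prev dropped h _
    have : cs = [] := List.eq_nil_of_length_eq_zero (by omega)
    simp [this, bgo, undblA]
  | succ n ih =>
    intro cs prev dropped hlen hw
    match cs with
    | [] => simp [bgo, undblA]
    | [c] =>
      rw [bgo_cons, if_neg (by simpa [willDrop] using hw)]
      simp [bgo, undblA]
    | c :: c2 :: t =>
      rw [bgo_cons, if_neg (by simpa [willDrop] using hw)]
      simp only [undblA, in_consonants_iff]
      by_cases hp : (CONSONANTS.contains c && (c2 == c)) = true
      · rw [if_pos hp]
        have hc2 : c2 = c := by simpa using (Bool.and_elim_right hp)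
        have hcc : CONSONANTS.contains c2 = true := hc2 ▸ Bool.and_elim_left hp
        rw [bgo_cons, if_pos (by simp [hc2]; exact List.mem_of_elem_eq_true (hc2 ▸ hcc))]
        congr 1
        exact ih t (some c2) true (by simp at hlen; omega) (by cases t <;> simp [willDrop])
      · rw [if_neg hp]
        congr 1
        apply ih (c2 :: t) (some c) false (by simp at hlen ⊢; omega)
        simp only [willDrop]
        simp only [Bool.and_eq_true, not_and, Bool.not_eq_true] at hp ⊢
        by_cases he : c2 = c
        · subst he
          cases hcc : CONSONANTS.contains c2 <;> simp_all
        · simp [he]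
def splitSp (pre : List Char) : List Char → List (List Char)
  | [] => [pre]
  | c :: rest => if c = ' ' then pre :: splitSp [] rest else splitSp (pre ++ [c]) rest

lemma splitOn_go_eq_splitSp : ∀ fuel l cur acc, l.length < fuel →
    PySem.Chars.splitOn.go [' '] fuel l cur acc = acc.reverse ++ splitSp cur.reverse l := by
  intro fuel
  induction fuel with
  | zero => intro l cur acc h; omega
  | succ fuel ih =>
    intro l cur acc h
    match l with
    | [] => rw [PySem.Chars.splitOn.go.eq_def]; simp [splitSp]
    | c :: rest =>
      rw [PySem.Chars.splitOn.go.eq_def]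
      simp only [List.isPrefixOf, List.length_cons] at *
      by_cases hc : c = ' '
      · subst hc
        rw [if_pos (by simp), ih _ _ _ (by simp; omega)]
        simp [splitSp]
      · rw [if_neg (by simp [Ne.symm hc]), ih _ _ _ (by omega)]
        simp [splitSp, hc]

lemma splitOn_eq_splitSp (l : List Char) :
    PySem.Chars.splitOn l [' '] = splitSp [] l := by
  rw [PySem.Chars.splitOn, splitOn_go_eq_splitSp _ _ _ _ (by omega)]
  simp

lemma contains_space : CONSONANTS.contains ' ' = false := by decide

lemma undblA_space_cons (ys : List Char) : undblA (' ' :: ys) = ' ' :: undblA ys := by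
  cases ys with
  | nil => simp [undblA]
  | cons y ys =>
    simp only [undblA, in_consonants_iff]
    rw [if_neg (by rw [contains_space]; simp)]

lemma undblA_append_space : ∀ n xs ys, xs.length ≤ n → (' ' ∉ xs) →
    undblA (xs ++ ' ' :: ys) = undblA xs ++ ' ' :: undblA ys := by
  intro n
  induction n with
  | zero =>
    intro xs ys h _
    have : xs = [] := List.eq_nil_of_length_eq_zero (by omega)
    subst this
    simpa [undblA] using undblA_space_cons ys
  | succ n ih =>
    intro xs ys hlen hsp
    match xs with
    | [] => simpa [undblA] using undblA_space_cons ys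
    | [a] =>
      have ha : ¬(' ' = a) := fun h => hsp (by simp [← h])
      simp only [List.cons_append, List.nil_append, undblA]
      rw [if_neg (by simp [ha]), undblA_space_cons]
    | a :: b :: t =>
      have hb : ' ' ∉ (b :: t) := fun h => hsp (List.mem_cons_of_mem _ h)
      simp only [List.cons_append, undblA]
      by_cases hp : (PySem.Set.contains CONSONANTS_SET a && (b == a)) = true
      · rw [if_pos hp, if_pos hp,
           ih t ys (by simp at hlen; omega) (fun h => hb (List.mem_cons_of_mem _ h))]
        rfl
      · rw [if_neg hp, if_neg hp,
           show b :: (t ++ ' ' :: ys) = (b :: t) ++ ' ' :: ys from rfl,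
           ih (b :: t) ys (by simp at hlen ⊢; omega) hb]
        rfl

lemma splitSp_ne_nil (pre : List Char) (l : List Char) : splitSp pre l ≠ [] := by
  induction l generalizing pre with
  | nil => simp [splitSp]
  | cons c rest ih => simp only [splitSp]; split <;> simp [ih]

lemma join_map_undblA_splitSp : ∀ l pre, (' ' ∉ pre) →
    PySem.Chars.join [' '] ((splitSp pre l).map undblA) = undblA (pre ++ l) := by
  intro l
  induction l with
  | nil => intro pre _; simp [splitSp, PySem.Chars.join_singleton]
  | cons c rest ih =>
    intro pre hpre
    simp only [splitSp]
    by_cases hc : c = ' '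
    · subst hc
      rw [if_pos rfl]
      have h2 := ih [] (by simp)
      simp only [List.nil_append] at h2
      obtain ⟨q, qs, hq⟩ : ∃ q qs, splitSp ([] : List Char) rest = q :: qs := by
        cases hh : splitSp ([] : List Char) rest with
        | nil => exact absurd hh (splitSp_ne_nil _ _)
        | cons q qs => exact ⟨q, qs, rfl⟩
      rw [hq] at h2 ⊢
      simp only [List.map_cons, PySem.Chars.join_cons_cons]
      rw [show (undblA q :: List.map undblA qs) = List.map undblA (q :: qs) from rfl, h2,
          undblA_append_space pre.length pre rest le_rfl hpre]
      simp
    · have hmem : ' ' ∉ pre ++ [c] := by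
        intro h
        rcases List.mem_append.1 h with h | h
        · exact hpre h
        · exact hc ((List.mem_singleton.1 h).symm)
      rw [if_neg hc, ih (pre ++ [c]) hmem]
      simp

-- ===== VERDICT (by name: the statement is the Claim_ definition above) =====
theorem inverse_double_consonants_spec : Claim_equal_inverse_double_consonants := by
  intro s _
  unfold Spec_inverse_double_consonants inverse_double_consonants inverse_double_consonants_alt
  rw [splitOn_eq_splitSp, foldl_bStep_eq_bgo,
      join_map_undblA_splitSp s.toList [] (by simp),
      bgo_eq_undblA s.toList.length s.toList none true le_rfl
        (by cases s.toList <;> simp [willDrop])]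
  simp
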